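-- pv_equiv track=rewrite | github.com/pypi-data/pypi-mirror-404 | packages/grafito/grafito-0.1.1-py3-none-any.whl/grafito/database.py | _split_cypher_statements
-- ===== SOURCE A (Python) =====
-- def _split_cypher_statements(script: str) -> list[str]:
--     """Split Cypher script into statements, respecting string literals and comments."""
--     statements = []
--     current = []
--     in_single = False
--     in_double = False
--     escape = False
--     in_line_comment = False
--     in_block_comment = False
--     i = 0
--     length = len(script)
--     while i < length:
--         ch = script[i]
--         nxt = script[i + 1] if i + 1 < length else ""
--         if escape:
--             current.append(ch)
--             escape = False
--             i += 1
--             continue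
--         if in_line_comment:
--             if ch == "\n":
--                 in_line_comment = False
--                 current.append(ch)
--             i += 1
--             continue
--         if in_block_comment:
--             if ch == "*" and nxt == "/":
--                 in_block_comment = False
--                 i += 2
--             else:
--                 i += 1
--             continue
--         if ch == "\\":
--             escape = True
--             current.append(ch)
--             i += 1
--             continue
--         if ch == "'" and not in_double:
--             in_single = not in_single
--             current.append(ch)
--             i += 1
--             continue
--         if ch == '"' and not in_single:
--             in_double = not in_double
--             current.append(ch)
--             i += 1
--             continue
--         if not in_single and not in_double:
--             if ch == "-" and nxt == "-":
--                 in_line_comment = True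
--                 i += 2
--                 continue
--             if ch == "/" and nxt == "/":
--                 in_line_comment = True
--                 i += 2
--                 continue
--             if ch == "/" and nxt == "*":
--                 in_block_comment = True
--                 i += 2
--                 continue
--         if ch == ";" and not in_single and not in_double:
--             statements.append("".join(current).strip())
--             current = []
--             i += 1
--             continue
--         current.append(ch)
--         i += 1
--
--     tail = "".join(current).strip()
--     if tail:
--         statements.append(tail)
--     return statements
-- ===== SOURCE B (Python) =====
-- def _split_cypher_statements(script: str) -> list[str]:
--     """Split Cypher script into statements, respecting string literals and comments."""
--     statements = []
--     buf = []
--     i, n = 0, len(script)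
--     while i < n:
--         ch = script[i]
--         if ch == "\\":
--             buf.append(ch)
--             if i + 1 < n:
--                 buf.append(script[i + 1])
--             i += 2
--         elif ch == "'" or ch == '"':
--             buf.append(ch)
--             j = i + 1
--             while j < n and script[j] != ch:
--                 if script[j] == "\\":
--                     buf.append(script[j])
--                     j += 1
--                     if j < n:
--                         buf.append(script[j])
--                         j += 1
--                 else:
--                     buf.append(script[j])
--                     j += 1
--             if j < n:
--                 buf.append(ch)
--                 j += 1
--             i = j
--         elif script.startswith(("--", "//"), i):
--             j = script.find("\n", i + 2)
--             if j == -1: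
--                 i = n
--             else:
--                 buf.append("\n")
--                 i = j + 1
--         elif script.startswith("/*", i):
--             j = script.find("*/", i + 2)
--             i = n if j == -1 else j + 2
--         elif ch == ";":
--             statements.append("".join(buf).strip())
--             buf = []
--             i += 1
--         else:
--             buf.append(ch)
--             i += 1
--     tail = "".join(buf).strip()
--     if tail:
--         statements.append(tail)
--     return statements
-- ===== Notes on version B (the rewrite author's own statement) =====
-- stated objective: alternative
-- what changed: Replaces A's char-at-a-time state machine with five boolean mode flags by a token-level scanner: each iteration consumes a whole lexical unit (escape pair, complete string literal via an inner scan, whole line/block comment via a forward search, semicolon, or plain char), so no mode flags exist at all.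
import Mathlib
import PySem

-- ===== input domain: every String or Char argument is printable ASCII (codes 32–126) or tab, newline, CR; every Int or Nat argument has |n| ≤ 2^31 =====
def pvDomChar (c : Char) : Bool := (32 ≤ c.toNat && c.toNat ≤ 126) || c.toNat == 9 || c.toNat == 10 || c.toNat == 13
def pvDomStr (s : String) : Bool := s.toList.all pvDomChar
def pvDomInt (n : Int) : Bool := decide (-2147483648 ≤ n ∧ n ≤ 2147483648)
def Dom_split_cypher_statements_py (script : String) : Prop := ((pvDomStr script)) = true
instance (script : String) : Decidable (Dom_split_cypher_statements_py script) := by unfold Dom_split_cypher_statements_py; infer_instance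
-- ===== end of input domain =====

-- B replaces A's flag-driven char loop by a token-level scanner (whole strings/comments consumed per step); alternative decomposition, same O(n) cost. Return value only; neither mutates.

-- ===== PORT A =====
-- Literal port of A's while-loop: one char per step, state = (in_single, in_double, escape, in_line_comment, in_block_comment);
-- nxt = script[i+1] if i+1<length else "" is rest.head? (comparison with a one-char string = `== some c`).
def loopA (cs cur : List Char) (stmts : List String) (sing dbl esc lc bc : Bool) : List String :=
  match cs with
  | [] =>
    let tail := PySem.Chars.strip cur
    if tail = [] then stmts else stmts ++ [String.ofList tail]
  | ch :: rest =>
    if esc then loopA rest (cur ++ [ch]) stmts sing dbl false lc bc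
    else if lc then
      if ch == '\n' then loopA rest (cur ++ [ch]) stmts sing dbl esc false bc
      else loopA rest cur stmts sing dbl esc lc bc
    else if bc then
      if ch == '*' && rest.head? == some '/' then loopA rest.tail cur stmts sing dbl esc lc false
      else loopA rest cur stmts sing dbl esc lc bc
    else if ch == '\\' then loopA rest (cur ++ [ch]) stmts sing dbl true lc bc
    else if ch == '\'' && !dbl then loopA rest (cur ++ [ch]) stmts (!sing) dbl esc lc bc
    else if ch == '"' && !sing then loopA rest (cur ++ [ch]) stmts sing (!dbl) esc lc bc
    else if !sing && !dbl && ch == '-' && rest.head? == some '-' then loopA rest.tail cur stmts sing dbl esc true bc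
    else if !sing && !dbl && ch == '/' && rest.head? == some '/' then loopA rest.tail cur stmts sing dbl esc true bc
    else if !sing && !dbl && ch == '/' && rest.head? == some '*' then loopA rest.tail cur stmts sing dbl esc lc true
    else if ch == ';' && !sing && !dbl then loopA rest [] (stmts ++ [String.ofList (PySem.Chars.strip cur)]) sing dbl esc lc bc
    else loopA rest (cur ++ [ch]) stmts sing dbl esc lc bc
termination_by cs.length
decreasing_by all_goals simp [List.length_tail]

def split_cypher_statements_py (script : String) : List String :=
  loopA script.toList [] [] false false false false false

-- ===== PORT B =====
-- Source B's inner string scan: chars after the opening quote up to and including the closing quote (or to EOF), plus the remainder.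
def scanStr (q : Char) (cs : List Char) : List Char × List Char :=
  match cs with
  | [] => ([], [])
  | c :: rest =>
    if c == q then ([q], rest)
    else if c == '\\' then
      match rest with
      | [] => (['\\'], [])
      | d :: rest2 =>
        let p := scanStr q rest2
        ('\\' :: d :: p.1, p.2)
    else
      let p := scanStr q rest
      (c :: p.1, p.2)

-- Source B's script.find("\n", …): ([], []) if no newline, else (["\n"], After the newline).
def dropLine (cs : List Char) : List Char × List Char :=
  match cs with
  | [] => ([], [])
  | c :: rest => if c == '\n' then (['\n'], rest) else dropLine rest

-- Source B's script.find("*/", …): remainder after the first "*/", or [] if unterminated.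
def dropBlock (cs : List Char) : List Char :=
  match cs with
  | [] => []
  | c :: rest =>
    if c == '*' && rest.head? == some '/' then rest.tail
    else dropBlock rest

-- length bounds cited by loopB's termination proof
theorem scanStr_snd_le' (q : Char) (n : Nat) : ∀ cs : List Char, cs.length ≤ n → (scanStr q cs).2.length ≤ cs.length := by
  induction n with
  | zero =>
    intro cs h
    have : cs = [] := by cases cs <;> simp_all
    simp [this, scanStr]
  | succ n ih =>
    intro cs h
    match cs with
    | [] => simp [scanStr]
    | c :: rest =>
      by_cases h1 : c == q
      · rw [scanStr.eq_def]; simp [h1]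
      · by_cases h2 : c == '\\'
        · match rest with
          | [] => simp [scanStr.eq_def, h1, h2]
          | d :: rest2 =>
            have := ih rest2 (by simp at h ⊢; omega)
            rw [scanStr.eq_def]; simp [h1, h2]; omega
        · have := ih rest (by simp at h ⊢; omega)
          rw [scanStr.eq_def]; simp [h1, h2]; omega

theorem scanStr_snd_le (q : Char) (cs : List Char) : (scanStr q cs).2.length ≤ cs.length :=
  scanStr_snd_le' q cs.length cs le_rfl

theorem dropLine_snd_le (cs : List Char) : (dropLine cs).2.length ≤ cs.length := by
  induction cs with
  | nil => simp [dropLine]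
  | cons c rest ih =>
    by_cases h : c == '\n' <;> simp [dropLine, h] <;> omega

theorem dropBlock_le (cs : List Char) : (dropBlock cs).length ≤ cs.length := by
  induction cs with
  | nil => simp [dropBlock]
  | cons c rest ih =>
    by_cases h : c == '*' && rest.head? == some '/'
    · have : rest.tail.length ≤ rest.length := by simp [List.length_tail]
      simp [dropBlock, h]; omega
    · simp [dropBlock, h]; omega

-- Literal port of Source B's outer loop: consume one token per iteration.
def loopB (cs cur : List Char) (stmts : List String) : List String :=
  match cs with
  | [] =>
    let tail := PySem.Chars.strip cur
    if tail = [] then stmts else stmts ++ [String.ofList tail]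
  | ch :: rest =>
    if ch == '\\' then
      match rest with
      | [] => loopB [] (cur ++ [ch]) stmts
      | d :: rest2 => loopB rest2 (cur ++ [ch, d]) stmts
    else if ch == '\'' || ch == '"' then
      let p := scanStr ch rest
      loopB p.2 (cur ++ [ch] ++ p.1) stmts
    else if (ch == '-' && rest.head? == some '-') || (ch == '/' && rest.head? == some '/') then
      let p := dropLine rest.tail
      loopB p.2 (cur ++ p.1) stmts
    else if ch == '/' && rest.head? == some '*' then
      loopB (dropBlock rest.tail) cur stmts
    else if ch == ';' then
      loopB rest [] (stmts ++ [String.ofList (PySem.Chars.strip cur)])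
    else loopB rest (cur ++ [ch]) stmts
termination_by cs.length
decreasing_by
  · simp
  · simp <;> omega
  · have := scanStr_snd_le ch rest
    simp <;> omega
  · have h1 := dropLine_snd_le rest.tail
    have h2 : rest.tail.length ≤ rest.length := by simp [List.length_tail]
    simp <;> omega
  · have h1 := dropBlock_le rest.tail
    have h2 : rest.tail.length ≤ rest.length := by simp [List.length_tail]
    simp <;> omega
  · simp
  · simp

def split_cypher_statements_py_alt (script : String) : List String :=
  loopB script.toList [] []

-- ===== PRECONDITION & SPEC =====
def Spec_split_cypher_statements_py (script : String) (out : List String) : Prop := out = split_cypher_statements_py_alt script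
instance (script : String) (out : List String) : Decidable (Spec_split_cypher_statements_py script out) := by unfold Spec_split_cypher_statements_py; infer_instance

-- ===== CLAIM (what is proved, stated in full; the proofs are below) =====
def Claim_equal_split_cypher_statements_py : Prop := ∀ (script : String), Dom_split_cypher_statements_py script → Spec_split_cypher_statements_py script (split_cypher_statements_py script)

-- ===== LEMMAS AND PROOFS =====

-- one-step unfolding lemmas (loopA/loopB/scanStr are wf-recursive; eq_def loops under simp)
theorem loopA_nil (cur : List Char) (stmts : List String) (s d e l b : Bool) :
    loopA [] cur stmts s d e l b
      = (if PySem.Chars.strip cur = [] then stmts else stmts ++ [String.ofList (PySem.Chars.strip cur)]) := by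
  rw [loopA.eq_def]

theorem loopB_nil (cur : List Char) (stmts : List String) :
    loopB [] cur stmts
      = (if PySem.Chars.strip cur = [] then stmts else stmts ++ [String.ofList (PySem.Chars.strip cur)]) := by
  rw [loopB.eq_def]

theorem scanStr_nil (q : Char) : scanStr q [] = ([], []) := by rw [scanStr.eq_def]

theorem scanStr_close (q : Char) (rest : List Char) : scanStr q (q :: rest) = ([q], rest) := by
  rw [scanStr.eq_def]; simp

theorem scanStr_esc (q : Char) (hq : q ≠ '\\') (d : Char) (rest2 : List Char) :
    scanStr q ('\\' :: d :: rest2) = ('\\' :: d :: (scanStr q rest2).1, (scanStr q rest2).2) := by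
  rw [scanStr.eq_def]; simp [Ne.symm hq]

theorem scanStr_esc_last (q : Char) (hq : q ≠ '\\') : scanStr q ['\\'] = (['\\'], []) := by
  rw [scanStr.eq_def]; simp [Ne.symm hq]

theorem scanStr_other (q : Char) (c : Char) (hc : c ≠ q) (hb : c ≠ '\\') (rest : List Char) :
    scanStr q (c :: rest) = (c :: (scanStr q rest).1, (scanStr q rest).2) := by
  rw [scanStr.eq_def]; simp [hc, hb]

theorem loopA_lc (cs : List Char) : ∀ cur stmts : _,
    loopA cs cur stmts false false false true false
      = loopA (dropLine cs).2 (cur ++ (dropLine cs).1) stmts false false false false false := by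
  induction cs with
  | nil => intro cur stmts; simp [loopA_nil, dropLine]
  | cons c rest ih =>
    intro cur stmts
    by_cases h : c = '\n'
    · subst h
      conv_lhs => rw [loopA.eq_def]
      simp [dropLine]
    · conv_lhs => rw [loopA.eq_def]
      simp [dropLine, h]
      exact ih cur stmts

theorem loopA_bc (cs : List Char) : ∀ cur stmts : _,
    loopA cs cur stmts false false false false true
      = loopA (dropBlock cs) cur stmts false false false false false := by
  induction cs with
  | nil => intro cur stmts; simp [loopA_nil, dropBlock]
  | cons c rest ih =>
    intro cur stmts
    by_cases h : c = '*' ∧ rest.head? = some '/'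
    · conv_lhs => rw [loopA.eq_def]
      simp [dropBlock, h.1, h.2]
    · conv_lhs => rw [loopA.eq_def]
      have h' : ¬(c == '*' && rest.head? == some '/') = true := by
        simp; intro h1 h2; exact h ⟨h1, h2⟩
      simp [dropBlock, h']
      exact ih cur stmts

theorem loopA_sing (n : Nat) : ∀ cs cur stmts, cs.length ≤ n →
    loopA cs cur stmts true false false false false
      = loopA (scanStr '\'' cs).2 (cur ++ (scanStr '\'' cs).1) stmts false false false false false := by
  induction n with
  | zero =>
    intro cs cur stmts h
    have hnil : cs = [] := by cases cs <;> simp_all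
    subst hnil; simp [loopA_nil, scanStr_nil]
  | succ n ih =>
    intro cs cur stmts h
    match cs with
    | [] => simp [loopA_nil, scanStr_nil]
    | c :: rest =>
      by_cases hq : c = '\''
      · subst hq
        conv_lhs => rw [loopA.eq_def]
        simp [scanStr_close]
      · by_cases hb : c = '\\'
        · subst hb
          conv_lhs => rw [loopA.eq_def]
          simp
          match rest with
          | [] => simp [loopA_nil, scanStr_esc_last '\'' (by decide)]
          | d :: rest2 =>
            conv_lhs => rw [loopA.eq_def]
            simp [scanStr_esc '\'' (by decide)]
            have := ih rest2 (cur ++ ['\\', d]) stmts (by simp at h ⊢; omega)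
            simpa using this
        · conv_lhs => rw [loopA.eq_def]
          simp [hq, hb, scanStr_other '\'' c hq hb]
          have := ih rest (cur ++ [c]) stmts (by simp at h ⊢; omega)
          simpa using this

theorem loopA_dbl (n : Nat) : ∀ cs cur stmts, cs.length ≤ n →
    loopA cs cur stmts false true false false false
      = loopA (scanStr '"' cs).2 (cur ++ (scanStr '"' cs).1) stmts false false false false false := by
  induction n with
  | zero =>
    intro cs cur stmts h
    have hnil : cs = [] := by cases cs <;> simp_all
    subst hnil; simp [loopA_nil, scanStr_nil]
  | succ n ih =>
    intro cs cur stmts h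
    match cs with
    | [] => simp [loopA_nil, scanStr_nil]
    | c :: rest =>
      by_cases hq : c = '"'
      · subst hq
        conv_lhs => rw [loopA.eq_def]
        simp [scanStr_close]
      · by_cases hb : c = '\\'
        · subst hb
          conv_lhs => rw [loopA.eq_def]
          simp
          match rest with
          | [] => simp [loopA_nil, scanStr_esc_last '"' (by decide)]
          | d :: rest2 =>
            conv_lhs => rw [loopA.eq_def]
            simp [scanStr_esc '"' (by decide)]
            have := ih rest2 (cur ++ ['\\', d]) stmts (by simp at h ⊢; omega)
            simpa using this
        · conv_lhs => rw [loopA.eq_def]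
          simp [hq, hb, scanStr_other '"' c hq hb]
          have := ih rest (cur ++ [c]) stmts (by simp at h ⊢; omega)
          simpa using this

theorem loopA_eq_loopB (n : Nat) : ∀ cs cur stmts, cs.length ≤ n →
    loopA cs cur stmts false false false false false = loopB cs cur stmts := by
  induction n with
  | zero =>
    intro cs cur stmts h
    have hnil : cs = [] := by cases cs <;> simp_all
    subst hnil; simp [loopA_nil, loopB_nil]
  | succ n ih =>
    intro cs cur stmts h
    match cs with
    | [] => simp [loopA_nil, loopB_nil]
    | c :: rest =>
      have hlen : rest.length ≤ n := by simp at h; omega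
      by_cases hb : c = '\\'
      · subst hb
        conv_lhs => rw [loopA.eq_def]
        conv_rhs => rw [loopB.eq_def]
        simp
        match rest with
        | [] =>
          conv_lhs => rw [loopA.eq_def]
          simp [loopB_nil]
        | d :: rest2 =>
          conv_lhs => rw [loopA.eq_def]
          simp
          have := ih rest2 (cur ++ ['\\', d]) stmts (by simp at hlen ⊢; omega)
          simpa using this
      · by_cases hsq : c = '\''
        · subst hsq
          conv_lhs => rw [loopA.eq_def]
          conv_rhs => rw [loopB.eq_def]
          simp
          rw [loopA_sing rest.length rest (cur ++ ['\'']) stmts le_rfl]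
          have := ih (scanStr '\'' rest).2 (cur ++ ['\''] ++ (scanStr '\'' rest).1) stmts
            (le_trans (scanStr_snd_le _ _) hlen)
          simpa using this
        · by_cases hdq : c = '"'
          · subst hdq
            conv_lhs => rw [loopA.eq_def]
            conv_rhs => rw [loopB.eq_def]
            simp
            rw [loopA_dbl rest.length rest (cur ++ ['"']) stmts le_rfl]
            have := ih (scanStr '"' rest).2 (cur ++ ['"'] ++ (scanStr '"' rest).1) stmts
              (le_trans (scanStr_snd_le _ _) hlen)
            simpa using this
          · by_cases hlc : (c = '-' ∧ rest.head? = some '-') ∨ (c = '/' ∧ rest.head? = some '/')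
            · obtain ⟨hc, hh⟩ | ⟨hc, hh⟩ := hlc <;> subst hc <;>
              · conv_lhs => rw [loopA.eq_def]
                conv_rhs => rw [loopB.eq_def]
                simp [hh]
                rw [loopA_lc]
                have hl : (dropLine rest.tail).2.length ≤ n :=
                  le_trans (dropLine_snd_le _) (le_trans (by simp [List.length_tail]) hlen)
                have := ih (dropLine rest.tail).2 (cur ++ (dropLine rest.tail).1) stmts hl
                simpa using this
            · by_cases hbc : c = '/' ∧ rest.head? = some '*'
              · obtain ⟨hc, hh⟩ := hbc; subst hc
                conv_lhs => rw [loopA.eq_def]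
                conv_rhs => rw [loopB.eq_def]
                simp [hh]
                rw [loopA_bc]
                have hl : (dropBlock rest.tail).length ≤ n :=
                  le_trans (dropBlock_le _) (le_trans (by simp [List.length_tail]) hlen)
                exact ih (dropBlock rest.tail) cur stmts hl
              · by_cases hsc : c = ';'
                · subst hsc
                  conv_lhs => rw [loopA.eq_def]
                  conv_rhs => rw [loopB.eq_def]
                  simp
                  exact ih rest [] (stmts ++ [String.ofList (PySem.Chars.strip cur)]) hlen
                · conv_lhs => rw [loopA.eq_def]
                  conv_rhs => rw [loopB.eq_def]
                  have h1 : ¬(c = '-' ∧ rest.head? = some '-') := fun hx => hlc (Or.inl hx)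
                  have h2 : ¬(c = '/' ∧ rest.head? = some '/') := fun hx => hlc (Or.inr hx)
                  simp [hb, hsq, hdq, hsc]
                  simp [h1, h2, hbc]
                  exact ih rest (cur ++ [c]) stmts hlen
-- ===== VERDICT (by name: the statement is the Claim_ definition above) =====
theorem split_cypher_statements_py_spec : Claim_equal_split_cypher_statements_py := by
  intro script _
  unfold Spec_split_cypher_statements_py split_cypher_statements_py split_cypher_statements_py_alt
  exact loopA_eq_loopB script.toList.length script.toList [] [] le_rfl
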